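-- pv_equiv track=rewrite | github.com/andrewromanenco/pyjvm | pyjvm/utils/javap.py | unpack_type
-- ===== SOURCE A (Python) =====
-- def unpack_type(type_name):
--     '''Make type string uman friendly.'''
--     if type_name[0] == '[':
--         return unpack_type(type_name[1:]) + '[]'
--     if type_name[0] == 'L':
--         return type_name[1:-1].replace('/', '.')
--     types = {
--         'B': 'byte',
--         'C': 'char',
--         'D': 'double',
--         'F': 'float',
--         'I': 'int',
--         'J': 'long',
--         'S': 'short',
--         'Z': 'boolean',
--         'V': 'void'
--     }
--     return types[type_name]
-- ===== SOURCE B (Python) =====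
-- def unpack_type(type_name):
--     '''Make type string uman friendly.'''
--     types = {
--         'B': 'byte',
--         'C': 'char',
--         'D': 'double',
--         'F': 'float',
--         'I': 'int',
--         'J': 'long',
--         'S': 'short',
--         'Z': 'boolean',
--         'V': 'void'
--     }
--     i = 0
--     while i < len(type_name) and type_name[i] == '[':
--         i += 1
--     rest = type_name[i:]
--     suffix = '[]' * i
--     if rest[0] == 'L':
--         return rest[1:-1].replace('/', '.') + suffix
--     return types[rest] + suffix
-- ===== Notes on version B (the rewrite author's own statement) =====
-- stated objective: alternative
-- what changed: Replaces A's recursion (one call per leading '[') with a single iterative scan that counts the array dimensions and appends '[]' * count once to the base type.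
-- outside the precondition, e.g. on unpack_type('['): A raises IndexError, B raises IndexError; on unpack_type('[]'): A raises KeyError, B raises KeyError; on unpack_type(''): A raises IndexError, B raises IndexError
import Mathlib
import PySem

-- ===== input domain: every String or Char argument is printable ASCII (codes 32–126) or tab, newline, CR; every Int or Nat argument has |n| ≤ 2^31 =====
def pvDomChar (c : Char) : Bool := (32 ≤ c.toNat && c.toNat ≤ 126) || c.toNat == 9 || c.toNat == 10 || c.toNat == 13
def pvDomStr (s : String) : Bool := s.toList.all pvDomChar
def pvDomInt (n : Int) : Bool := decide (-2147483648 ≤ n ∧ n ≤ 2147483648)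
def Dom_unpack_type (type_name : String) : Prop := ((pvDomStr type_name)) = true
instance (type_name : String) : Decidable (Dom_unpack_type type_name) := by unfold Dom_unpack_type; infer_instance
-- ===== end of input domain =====

-- B replaces A's recursion with one scan that counts leading '[' and appends '[]' * count once (objective: alternative decomposition).

-- ===== PORT A =====
-- the primitive-type table of A (identical literal appears in B's source)
def javaTypes : PySem.Dict String String :=
  PySem.Dict.ofList [("B", "byte"), ("C", "char"), ("D", "double"), ("F", "float"),
    ("I", "int"), ("J", "long"), ("S", "short"), ("Z", "boolean"), ("V", "void")]

-- recursion of A over the characters; [] = IndexError (excluded by Pre_),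
-- a missing dict key = KeyError (excluded by Pre_, modelled as "")
def unpackA : List Char → List Char
  | [] => []
  | c :: rest =>
    if c = '[' then unpackA rest ++ ['[', ']']
    else if c = 'L' then PySem.Chars.replace rest.dropLast ['/'] ['.']
    else ((javaTypes.get? (String.mk (c :: rest))).getD "").toList

def unpack_type (type_name : String) : String := String.mk (unpackA type_name.toList)

-- ===== PORT B =====
def unpack_type_alt (type_name : String) : String :=
  let cs := type_name.toList
  let i := (cs.takeWhile (· == '[')).length       -- the while loop counting leading '['
  let rest := cs.dropWhile (· == '[')             -- rest = type_name[i:]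
  let suffix := PySem.List.pyRepeat ['[', ']'] (i : Int)   -- '[]' * i
  match rest with
  | [] => ""                                      -- rest[0] = IndexError (excluded by Pre_)
  | c :: r =>
    if c = 'L' then String.mk (PySem.Chars.replace r.dropLast ['/'] ['.'] ++ suffix)
    else String.mk ((((javaTypes.get? (String.mk (c :: r))).getD "").toList) ++ suffix)

-- ===== PRECONDITION & SPEC =====
-- Pre_ excludes exactly the inputs where Python A raises: IndexError when nothing follows
-- the leading '[' run, KeyError when the remainder is neither a class-name descriptor nor a
-- one-letter primitive key.
def Pre_unpack_type (type_name : String) : Prop :=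
  let rest := type_name.toList.dropWhile (· == '[')
  rest ≠ [] ∧ (rest.head? = some 'L' ∨
    String.mk rest ∈ ["B", "C", "D", "F", "I", "J", "S", "Z", "V"])
instance (type_name : String) : Decidable (Pre_unpack_type type_name) := by
  unfold Pre_unpack_type; infer_instance

def pvWitness_unpack_type : String := "[[Ljava/lang/String;"

def Spec_unpack_type (type_name : String) (out : String) : Prop := out = unpack_type_alt type_name
instance (type_name : String) (out : String) : Decidable (Spec_unpack_type type_name out) := by unfold Spec_unpack_type; infer_instance

-- ===== CLAIM (what is proved, stated in full; the proofs are below) =====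
def Claim_equal_unpack_type : Prop := ∀ (type_name : String), Dom_unpack_type type_name → Pre_unpack_type type_name → Spec_unpack_type type_name (unpack_type type_name)

-- ===== LEMMAS AND PROOFS =====

theorem pyRepeat_nat_succ {α : Type} (l : List α) (k : Nat) :
    PySem.List.pyRepeat l ((k + 1 : Nat) : Int) = PySem.List.pyRepeat l (k : Int) ++ l := by
  simp [PySem.List.pyRepeat, List.replicate_succ', List.flatten_append]

-- A's recursion unrolled: the leading '[' run becomes a '[]' * count suffix.
theorem unpackA_dropWhile (cs : List Char) :
    cs.dropWhile (· == '[') ≠ [] →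
    unpackA cs = unpackA (cs.dropWhile (· == '[')) ++
      PySem.List.pyRepeat ['[', ']'] ((cs.takeWhile (· == '[')).length : Int) := by
  induction cs with
  | nil => intro h; simp at h
  | cons c t ih =>
    intro h
    by_cases hc : c = '['
    · subst hc
      rw [List.dropWhile_cons_of_pos (by decide), List.takeWhile_cons_of_pos (by decide)]
      rw [List.dropWhile_cons_of_pos (by decide)] at h
      rw [show unpackA ('[' :: t) = unpackA t ++ ['[', ']'] from rfl, ih h,
        List.length_cons, pyRepeat_nat_succ, List.append_assoc]
    · rw [List.dropWhile_cons_of_neg (by simpa using hc),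
        List.takeWhile_cons_of_neg (by simpa using hc)]
      simp [PySem.List.pyRepeat]

-- ===== VERDICT (by name: the statement is the Claim_ definition above) =====
theorem unpack_type_spec : Claim_equal_unpack_type := by
  intro s _ hpre
  obtain ⟨hne, -⟩ := hpre
  show unpack_type s = unpack_type_alt s
  unfold unpack_type unpack_type_alt
  rw [unpackA_dropWhile s.toList hne]
  obtain ⟨c, r, hcr⟩ := List.exists_cons_of_ne_nil hne
  have h2 := List.head_dropWhile_not (· == '[') hne
  have h3 : (List.dropWhile (· == '[') s.toList).head hne = c := by
    have h4 := List.head?_eq_head (l := List.dropWhile (· == '[') s.toList) hne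
    have h5 : (List.dropWhile (· == '[') s.toList).head? = some c := by rw [hcr]; rfl
    exact Option.some.inj (h4.symm.trans h5)
  rw [h3] at h2
  have hhead : c ≠ '[' := by simpa using h2
  simp only [hcr]
  by_cases hL : c = 'L'
  · subst hL
    rw [show unpackA ('L' :: r) = PySem.Chars.replace r.dropLast ['/'] ['.'] from rfl]
    simp
  · rw [show unpackA (c :: r) =
      if c = '[' then unpackA r ++ ['[', ']']
      else if c = 'L' then PySem.Chars.replace r.dropLast ['/'] ['.']
      else ((javaTypes.get? (String.mk (c :: r))).getD "").toList from rfl]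
    rw [if_neg hhead, if_neg hL]
    simp [hL]
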